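-- pv_equiv track=rewrite | github.com/mouredev/retos-programacion-2023 | Retos/Reto #28 - EXPRESIÓN MATEMÁTICA [Media]/python/marcoatrs.py | expresion_matematica
-- ===== SOURCE A (Python) =====
-- signos_permitidos = "0123456789+-/*% "
--
-- parejas_invalidas = ["*/", "/*", "%/", "/%", "*%", "%*", "%%", "+/", "-/"]
--
-- def expresion_matematica(expresion: str) -> bool:
--     # Caracter invalido
--     for c in expresion:
--         if c not in signos_permitidos:
--             return False
--     # Signos dobles
--     expresion = expresion.replace(" ", "")
--     for par in parejas_invalidas:
--         if par in expresion:
--             return False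
--     return True
-- ===== SOURCE B (Python) =====
-- _BAD = {"*/", "/*", "%/", "/%", "*%", "%*", "%%", "+/", "-/"}
--
-- def expresion_matematica(expresion: str) -> bool:
--     prev = ""
--     for c in expresion:
--         if c not in "0123456789+-/*% ":
--             return False
--         if c == " ":
--             continue
--         if prev + c in _BAD:
--             return False
--         prev = c
--     return True
-- ===== Notes on version B (the rewrite author's own statement) =====
-- stated objective: alternative
-- what changed: B replaces A's two passes (a character scan, then a space-stripping copy searched for nine forbidden substrings) by one single scan that tracks the previous non-space character and rejects a forbidden digraph on the spot.
import Mathlib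
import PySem

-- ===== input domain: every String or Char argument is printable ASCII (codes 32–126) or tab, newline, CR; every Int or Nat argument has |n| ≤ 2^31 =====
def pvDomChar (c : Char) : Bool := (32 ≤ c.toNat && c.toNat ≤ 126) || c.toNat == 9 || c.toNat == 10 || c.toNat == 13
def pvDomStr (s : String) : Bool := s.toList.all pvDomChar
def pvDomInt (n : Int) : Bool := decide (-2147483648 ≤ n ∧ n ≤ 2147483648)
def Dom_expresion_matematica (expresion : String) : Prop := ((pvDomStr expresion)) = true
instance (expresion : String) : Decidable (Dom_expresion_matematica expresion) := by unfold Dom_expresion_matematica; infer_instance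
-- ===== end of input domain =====

-- B fuses A's two passes (char scan, then space-stripped copy searched for nine digraphs)
-- into one scan keeping the previous non-space character; objective: alternative single-pass algorithm.

-- ===== PORT A =====
def signosPermitidos : String := "0123456789+-/*% "

def parejasInvalidas : List String := ["*/", "/*", "%/", "/%", "*%", "%*", "%%", "+/", "-/"]

-- first loop of A: return False on the first character not in signos_permitidos
def aChars : List Char → Bool
  | [] => true
  | c :: rest => if signosPermitidos.toList.contains c = false then false else aChars rest

-- second loop of A: return False on the first forbidden pair found as a substring
def aPares : String → List String → Bool
  | _, [] => true
  | s, par :: rest => if PySem.Str.isIn par s then false else aPares s rest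

def expresion_matematica (expresion : String) : Bool :=
  if aChars expresion.toList = false then false
  else aPares (PySem.Str.replace expresion " " "") parejasInvalidas

-- ===== PORT B =====
def badParejas : List (List Char) :=
  [['*','/'], ['/','*'], ['%','/'], ['/','%'], ['*','%'], ['%','*'], ['%','%'], ['+','/'], ['-','/']]

-- B's single loop: prev is the last non-space character seen (as a string, initially empty)
def bLoop : List Char → List Char → Bool
  | _, [] => true
  | prev, c :: rest =>
    if ("0123456789+-/*% ".toList.contains c) = false then false
    else if c == ' ' then bLoop prev rest
    else if badParejas.contains (prev ++ [c]) then false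
    else bLoop [c] rest

def expresion_matematica_alt (expresion : String) : Bool :=
  bLoop [] expresion.toList

-- ===== PRECONDITION & SPEC =====
def Spec_expresion_matematica (expresion : String) (out : Bool) : Prop := out = expresion_matematica_alt expresion
instance (expresion : String) (out : Bool) : Decidable (Spec_expresion_matematica expresion out) := by unfold Spec_expresion_matematica; infer_instance

-- ===== CLAIM (what is proved, stated in full; the proofs are below) =====
def Claim_equal_expresion_matematica : Prop := ∀ (expresion : String), Dom_expresion_matematica expresion → Spec_expresion_matematica expresion (expresion_matematica expresion)

-- ===== LEMMAS AND PROOFS =====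

-- "no two adjacent characters form a forbidden pair" — common reference form
def noAdj : List Char → Bool
  | [] => true
  | [_] => true
  | a :: b :: r => !(badParejas.contains [a, b]) && noAdj (b :: r)

-- the tail of B's loop once all characters are known valid and spaces are gone
def bTail : List Char → List Char → Bool
  | _, [] => true
  | prev, c :: r => if badParejas.contains (prev ++ [c]) then false else bTail [c] r

theorem aChars_eq_all (l : List Char) :
    aChars l = l.all (fun c => signosPermitidos.toList.contains c) := by
  induction l with
  | nil => rfl
  | cons c rest ih =>
    simp only [aChars, List.all_cons]
    cases hv : signosPermitidos.toList.contains c with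
    | false => rw [if_pos rfl]; simp
    | true => rw [if_neg (by simp), ih, Bool.true_and]

theorem aPares_eq_any (s : String) (L : List String) :
    aPares s L = !(L.any (fun p => PySem.Str.isIn p s)) := by
  induction L with
  | nil => rfl
  | cons p rest ih =>
    simp only [aPares, List.any_cons]
    cases h : PySem.Str.isIn p s with
    | true => rw [if_pos rfl]; simp
    | false => rw [if_neg (by simp), ih]; simp

theorem replace_go_filter (fuel : Nat) (l acc : List Char) (h : l.length ≤ fuel) :
    PySem.Chars.replace.go [' '] [] fuel l acc
      = acc.reverse ++ l.filter (fun c => !(c == ' ')) := by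
  induction fuel generalizing l acc with
  | zero =>
    cases l with
    | nil => simp [PySem.Chars.replace.go]
    | cons c t => simp at h
  | succ n ih =>
    cases l with
    | nil => simp [PySem.Chars.replace.go]
    | cons c t =>
      simp only [List.length_cons, Nat.succ_le_succ_iff] at h
      by_cases hc : c = ' '
      · subst hc
        have hp : List.isPrefixOf [' '] (' ' :: t) = true := by
          simp [List.isPrefixOf]
        simp [PySem.Chars.replace.go, hp, ih t acc h]
      · have hp : List.isPrefixOf [' '] (c :: t) = false := by
          simp [List.isPrefixOf]
          exact fun hh => hc hh.symm
        have := ih t (c :: acc) h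
        simp [PySem.Chars.replace.go, hp, this, hc]

theorem replace_space (e : String) :
    (PySem.Str.replace e " " "").toList = e.toList.filter (fun c => !(c == ' ')) := by
  have h1 : (" " : String).toList = [' '] := rfl
  have h2 : ("" : String).toList = [] := rfl
  rw [PySem.Str.toList_replace, h1, h2]
  rw [PySem.Chars.replace]
  simp only [List.isEmpty_cons]
  exact replace_go_filter e.toList.length e.toList [] (le_refl _)

-- characterisation of noAdj failure by an infix forbidden pair
theorem noAdj_false_iff (m : List Char) :
    noAdj m = false ↔ ∃ pr ∈ badParejas, pr <:+: m := by
  induction m with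
  | nil =>
    constructor
    · intro h; simp [noAdj] at h
    · rintro ⟨pr, hmem, hinf⟩
      rw [List.infix_nil] at hinf
      subst hinf
      revert hmem; decide
  | cons a t iht =>
    cases t with
    | nil =>
      constructor
      · intro h; simp [noAdj] at h
      · rintro ⟨pr, hmem, hinf⟩
        have hl := hinf.length_le
        fin_cases hmem <;> simp at hl
    | cons b r =>
      have hpre : ∀ pr ∈ badParejas, pr <+: a :: b :: r → pr = [a, b] := by
        intro pr hmem hp
        fin_cases hmem <;>
          · simp [List.cons_prefix_cons] at hp
            rw [← hp.1, ← hp.2]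
      constructor
      · intro h
        simp only [noAdj, Bool.and_eq_false_iff, Bool.not_eq_false'] at h
        rcases h with h | h
        · have hmem : [a, b] ∈ badParejas := by
            have := h
            rw [List.contains_eq_mem] at this
            exact of_decide_eq_true this
          exact ⟨[a, b], hmem, List.IsPrefix.isInfix (by simp [List.cons_prefix_cons])⟩
        · rcases iht.mp h with ⟨pr, hmem, hinf⟩
          exact ⟨pr, hmem, hinf.trans (List.suffix_cons a (b :: r)).isInfix⟩
      · rintro ⟨pr, hmem, hinf⟩
        rw [List.infix_cons_iff] at hinf
        simp only [noAdj, Bool.and_eq_false_iff, Bool.not_eq_false']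
        rcases hinf with hp | hinf
        · left
          have heq := hpre pr hmem hp
          subst heq
          rw [List.contains_eq_mem]
          exact decide_eq_true hmem
        · right
          exact iht.mpr ⟨pr, hmem, hinf⟩

theorem bTail_single (m : List Char) : ∀ c, bTail [c] m = noAdj (c :: m) := by
  induction m with
  | nil => intro c; rfl
  | cons b r ih =>
    intro c
    simp only [bTail, noAdj, List.singleton_append]
    by_cases hb : badParejas.contains [c, b] = true
    · rw [if_pos hb, hb]; simp
    · rw [if_neg hb, ih b]
      rw [Bool.not_eq_true] at hb
      rw [hb]; simp

theorem bTail_nil (m : List Char) : bTail [] m = noAdj m := by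
  cases m with
  | nil => rfl
  | cons c r =>
    have hc : badParejas.contains ([] ++ [c]) = false := by
      simp [badParejas]
    simp only [bTail, hc]
    exact bTail_single r c

theorem bLoop_split (l : List Char) : ∀ prev,
    bLoop prev l =
      (l.all (fun c => "0123456789+-/*% ".toList.contains c)
        && bTail prev (l.filter (fun c => !(c == ' ')))) := by
  induction l with
  | nil => intro prev; rfl
  | cons c rest ih =>
    intro prev
    simp only [bLoop, List.all_cons, List.filter_cons]
    cases hv : ("0123456789+-/*% ".toList.contains c) with
    | false => rw [if_pos rfl]; simp
    | true =>
      rw [if_neg (by simp), Bool.true_and]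
      cases hs : (c == ' ') with
      | true =>
        rw [if_pos rfl]
        simp only [Bool.not_true, if_neg (by simp : ¬ (false = true))]
        exact ih prev
      | false =>
        rw [if_neg (by simp), Bool.not_false, if_pos rfl]
        cases hb : badParejas.contains (prev ++ [c]) with
        | true =>
          rw [if_pos rfl]
          simp only [bTail]
          rw [if_pos hb]
          simp
        | false =>
          rw [if_neg (by simp), ih [c]]
          simp only [bTail]
          rw [if_neg (by rw [hb]; exact Bool.false_ne_true)]

-- A searches the nine strings in the space-stripped input; over char lists this is
-- exactly a search for the nine char pairs
theorem any_isIn_eq (s : String) :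
    (parejasInvalidas.any (fun p => PySem.Str.isIn p s)) =
      (badParejas.any (fun pr => decide (pr <:+: s.toList))) := by
  have h1 : ∀ p : String, PySem.Str.isIn p s = decide (p.toList <:+: s.toList) := by
    intro p
    cases h : PySem.Str.isIn p s with
    | true =>
      exact (decide_eq_true ((PySem.Str.isIn_iff_infix p s).mp h)).symm
    | false =>
      refine (decide_eq_false ?_).symm
      intro hinf
      rw [(PySem.Str.isIn_iff_infix p s).mpr hinf] at h
      exact Bool.true_eq_false.mp h
  simp only [parejasInvalidas, badParejas, List.any_cons, List.any_nil, h1]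
  rfl

theorem noAdj_eq_not_any (m : List Char) :
    noAdj m = !(badParejas.any (fun pr => decide (pr <:+: m))) := by
  cases h : noAdj m with
  | false =>
    rcases (noAdj_false_iff m).mp h with ⟨pr, hmem, hinf⟩
    have : badParejas.any (fun pr => decide (pr <:+: m)) = true :=
      List.any_eq_true.mpr ⟨pr, hmem, decide_eq_true hinf⟩
    rw [this]; rfl
  | true =>
    have : badParejas.any (fun pr => decide (pr <:+: m)) = false := by
      cases ha : badParejas.any (fun pr => decide (pr <:+: m)) with
      | false => rfl
      | true =>
        rcases List.any_eq_true.mp ha with ⟨pr, hmem, hd⟩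
        have hfalse := (noAdj_false_iff m).mpr ⟨pr, hmem, of_decide_eq_true hd⟩
        rw [h] at hfalse
        exact absurd hfalse (by simp)
    rw [this]; rfl

theorem aPares_eq_noAdj (s : String) :
    aPares s parejasInvalidas = noAdj s.toList := by
  rw [aPares_eq_any, any_isIn_eq, noAdj_eq_not_any]

theorem same_alphabet : signosPermitidos.toList = "0123456789+-/*% ".toList := rfl

-- ===== VERDICT (by name: the statement is the Claim_ definition above) =====
theorem expresion_matematica_spec : Claim_equal_expresion_matematica := by
  intro e _
  unfold Spec_expresion_matematica expresion_matematica expresion_matematica_alt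
  rw [bLoop_split, bTail_nil, aChars_eq_all, same_alphabet]
  cases h : e.toList.all (fun c => "0123456789+-/*% ".toList.contains c) with
  | false => rw [if_pos rfl]; simp
  | true =>
    rw [if_neg (by simp), Bool.true_and, aPares_eq_noAdj, replace_space]
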